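-- pv_equiv track=rewrite | github.com/nikitarudakov/test_task | lucky.py | pure_loop_search
-- ===== SOURCE A (Python) =====
-- def pure_loop_search(seq_num: int) -> str:
--     # first cast value from int to str
--     seq_str = str(seq_num)
--
--     lucky_series = '0'
--     lucky_numbers = [str(5), str(6)]
--
--     # let's define a search state
--     search_state = 0 # meaning there has been no first entry from lucky series
--
--     index = 0
--     while (index < len(seq_str)):
--         num_str = seq_str[index]
--
--         if search_state == 0 and num_str in lucky_numbers:
--             first_index = index
--             search_state = 1
--
--         elif search_state == 1 and num_str not in lucky_numbers:
--             last_index = index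
--
--             new_series = seq_str[first_index:last_index]
--
--             if len(new_series) > len(lucky_series) and len(set(map(int, new_series))) == 2:
--                 lucky_series = new_series
--
--             search_state = 0
--
--
--         elif search_state == 1 and num_str in lucky_numbers and index == len(seq_str)-1:
--             new_series = seq_str[first_index:]
--             if len(new_series) > len(lucky_series) and len(set(map(int, new_series))) == 2:
--                 lucky_series = new_series
--
--             search_state = 0
--
--
--         index += 1
--
--     return lucky_series
-- ===== SOURCE B (Python) =====
-- def pure_loop_search(seq_num: int) -> str:
--     # exhaustive search: try every substring of str(seq_num), keep the first
--     # longest one whose character set is exactly {'5', '6'}.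
--     s = str(seq_num)
--     best = '0'
--     for i in range(len(s)):
--         for j in range(i + 1, len(s) + 1):
--             sub = s[i:j]
--             if len(sub) > len(best) and set(sub) == {'5', '6'}:
--                 best = sub
--     return best
-- ===== Notes on version B (the rewrite author's own statement) =====
-- stated objective: alternative
-- what changed: Replaces A's single-pass index-based three-branch state machine by an exhaustive search: try every substring s[i:j] of str(seq_num) and keep the first longest one whose character set is exactly {'5','6'}.
import Mathlib
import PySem

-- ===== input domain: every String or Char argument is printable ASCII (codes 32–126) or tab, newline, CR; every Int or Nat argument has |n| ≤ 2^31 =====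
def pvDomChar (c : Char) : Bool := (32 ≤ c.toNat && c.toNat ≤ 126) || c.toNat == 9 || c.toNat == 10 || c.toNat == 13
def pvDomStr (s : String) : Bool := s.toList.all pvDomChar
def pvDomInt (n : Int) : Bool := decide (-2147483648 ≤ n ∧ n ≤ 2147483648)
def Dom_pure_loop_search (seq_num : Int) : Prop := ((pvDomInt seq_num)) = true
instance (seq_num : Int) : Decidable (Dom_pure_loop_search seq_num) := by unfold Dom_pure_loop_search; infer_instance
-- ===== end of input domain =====

-- B replaces A's inline index-based state machine by an exhaustive substring search:
-- try every substring of str(seq_num) and keep the first longest one whose character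
-- set is exactly {'5','6'} (alternative decomposition; quadratic, not faster).

-- ===== PORT A =====
-- int(c) for a digit character c (A maps int over new_series, which holds only digit chars)
def pvDigitInt (c : Char) : Int := (c.toNat : Int) - 48

-- A's while loop: lucky = lucky_series, state = search_state, first = first_index
def pureLoopA (s : List Char) (lucky : List Char) (state first index : Nat) : List Char :=
  if h : index < s.length then
    let c := s[index]
    if state = 0 ∧ c ∈ ['5', '6'] then
      pureLoopA s lucky 1 index (index + 1)
    else if state = 1 ∧ c ∉ ['5', '6'] then
      let ns := PySem.List.slice s (some (first : Int)) (some (index : Int))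
      let lucky' := if ns.length > lucky.length ∧ (PySem.Set.ofList (ns.map pvDigitInt)).length = 2 then ns else lucky
      pureLoopA s lucky' 0 first (index + 1)
    else if state = 1 ∧ c ∈ ['5', '6'] ∧ index = s.length - 1 then
      let ns := PySem.List.slice s (some (first : Int)) none
      let lucky' := if ns.length > lucky.length ∧ (PySem.Set.ofList (ns.map pvDigitInt)).length = 2 then ns else lucky
      pureLoopA s lucky' 0 first (index + 1)
    else
      pureLoopA s lucky state first (index + 1)
  else lucky
termination_by s.length - index
decreasing_by all_goals omega

def pure_loop_search (seq_num : Int) : String :=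
  String.ofList (pureLoopA (PySem.Int.toChars seq_num) ['0'] 0 0 0)

-- ===== PORT B =====
-- B's nested loops: for i in range(len(s)): for j in range(i+1, len(s)+1): …
def pureBruteB (s : List Char) : List Char :=
  (PySem.List.pyRange 0 (s.length : Int) 1).foldl
    (fun best i =>
      (PySem.List.pyRange (i + 1) ((s.length : Int) + 1) 1).foldl
        (fun best j =>
          let sub := PySem.List.slice s (some i) (some j)
          if sub.length > best.length ∧
              PySem.Set.equal (PySem.Set.ofList sub) (PySem.Set.ofList ['5', '6']) = true
          then sub else best)
        best)
    ['0']

def pure_loop_search_alt (seq_num : Int) : String :=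
  String.ofList (pureBruteB (PySem.Int.toChars seq_num))

-- ===== PRECONDITION & SPEC =====
def Spec_pure_loop_search (seq_num : Int) (out : String) : Prop := out = pure_loop_search_alt seq_num
instance (seq_num : Int) (out : String) : Decidable (Spec_pure_loop_search seq_num out) := by unfold Spec_pure_loop_search; infer_instance

-- ===== CLAIM (what is proved, stated in full; the proofs are below) =====
def Claim_equal_pure_loop_search : Prop := ∀ (seq_num : Int), Dom_pure_loop_search seq_num → Spec_pure_loop_search seq_num (pure_loop_search seq_num)

-- ===== LEMMAS AND PROOFS =====

-- the common intermediate form both proofs meet at: the maximal '5'/'6' runs of the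
-- digit string, folded with the strict-improvement step

def pv56 (c : Char) : Bool := decide (c = '5' ∨ c = '6')

-- "the character set of r is exactly {'5','6'}"
def pvValid (r : List Char) : Prop := '5' ∈ r ∧ '6' ∈ r ∧ ∀ c ∈ r, c = '5' ∨ c = '6'

-- B's loop body, with the set-equality test spelled out
def pvStepV (b r : List Char) : List Char :=
  if r.length > b.length ∧ '5' ∈ r ∧ '6' ∈ r ∧ ∀ c ∈ r, c = '5' ∨ c = '6' then r else b

-- the step over a run already known to consist of '5'/'6' only
def pvStep (b r : List Char) : List Char :=
  if r.length > b.length ∧ '5' ∈ r ∧ '6' ∈ r then r else b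

-- the maximal 5/6 runs of s, in order
def pureRunsB (s : List Char) (cur : List Char) (runs : List (List Char)) : List (List Char) :=
  match s with
  | [] => if cur = [] then runs else runs ++ [cur]
  | c :: t =>
      if c = '5' ∨ c = '6' then pureRunsB t (cur ++ [c]) runs
      else if cur = [] then pureRunsB t [] runs
      else pureRunsB t [] (runs ++ [cur])

def pureBestB (runs : List (List Char)) (best : List Char) : List Char :=
  runs.foldl (fun b r => if r.length > b.length ∧ '5' ∈ r ∧ '6' ∈ r then r else b) best

-- the longest valid substring starting at the head of t ([] if none)
def pvCand (t : List Char) : List Char :=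
  if '5' ∈ t.takeWhile pv56 ∧ '6' ∈ t.takeWhile pv56 then t.takeWhile pv56 else []

theorem pureBestB_singleton (r best : List Char) :
    pureBestB [r] best = pvStep best r := by
  simp [pureBestB, pvStep, List.foldl]

theorem pureRunsB_acc (s : List Char) : ∀ cur acc,
    pureRunsB s cur acc = acc ++ pureRunsB s cur [] := by
  induction s with
  | nil => intro cur acc; by_cases h : cur = [] <;> simp [pureRunsB, h]
  | cons c t ih =>
      intro cur acc
      by_cases h1 : c = '5' ∨ c = '6'
      · simp [pureRunsB, h1]; rw [ih (cur ++ [c]) acc]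
      · by_cases h2 : cur = []
        · simp [pureRunsB, h1, h2]; exact ih [] acc
        · simp [pureRunsB, h1, h2]
          rw [ih [] (acc ++ [cur]), ih [] [cur]]
          simp

-- for a nodup Int list all of whose elements are 5 or 6
theorem pvLen2_iff (l : List Int) (hnd : l.Nodup) (hel : ∀ x ∈ l, x = 5 ∨ x = 6) :
    l.length = 2 ↔ ((5 : Int) ∈ l ∧ (6 : Int) ∈ l) := by
  rcases l with _ | ⟨a, _ | ⟨b, t⟩⟩
  · simp
  · simp only [List.length_singleton, List.mem_singleton]
    constructor
    · omega
    · rintro ⟨rfl, h⟩; omega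
  · have ha : a = 5 ∨ a = 6 := hel a (by simp)
    have hb : b = 5 ∨ b = 6 := hel b (by simp)
    simp only [List.nodup_cons, List.mem_cons] at hnd
    have hab : a ≠ b := fun h => hnd.1 (Or.inl h)
    have ht : t = [] := by
      rcases t with _ | ⟨x, t'⟩
      · rfl
      · exfalso
        have hx : x = 5 ∨ x = 6 := hel x (by simp)
        have hxa : x ≠ a := fun h => hnd.1 (Or.inr (by simp [h.symm]))
        have hxb : x ≠ b := fun h => hnd.2.1 (by simp [h.symm])
        omega
    subst ht
    simp only [List.length_cons, List.length_nil, List.mem_cons, List.not_mem_nil, or_false]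
    constructor
    · intro _; omega
    · intro _; trivial

-- A's set-cardinality test is the two-membership test, on a run of '5'/'6' chars
theorem pvCond_iff (p : List Char) (hp : ∀ c ∈ p, c = '5' ∨ c = '6') :
    (PySem.Set.ofList (p.map pvDigitInt)).length = 2 ↔ ('5' ∈ p ∧ '6' ∈ p) := by
  have hel : ∀ x ∈ PySem.Set.ofList (p.map pvDigitInt), x = 5 ∨ x = 6 := by
    intro x hx
    rw [PySem.Set.mem_ofList, List.mem_map] at hx
    obtain ⟨c, hc, rfl⟩ := hx
    rcases hp c hc with rfl | rfl
    · left; decide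
    · right; decide
  rw [pvLen2_iff _ (PySem.Set.nodup_ofList _) hel]
  have h5 : ((5 : Int) ∈ PySem.Set.ofList (p.map pvDigitInt)) ↔ '5' ∈ p := by
    rw [PySem.Set.mem_ofList, List.mem_map]
    constructor
    · rintro ⟨c, hc, hv⟩
      rcases hp c hc with rfl | rfl
      · exact hc
      · exact absurd hv (by decide)
    · intro h; exact ⟨'5', h, by decide⟩
  have h6 : ((6 : Int) ∈ PySem.Set.ofList (p.map pvDigitInt)) ↔ '6' ∈ p := by
    rw [PySem.Set.mem_ofList, List.mem_map]
    constructor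
    · rintro ⟨c, hc, hv⟩
      rcases hp c hc with rfl | rfl
      · exact absurd hv (by decide)
      · exact hc
    · intro h; exact ⟨'6', h, by decide⟩
  rw [h5, h6]

-- pvStep ignores a run too short to contain both digits
theorem pvStep_short (b p : List Char) (hp : p.length ≤ 1) : pvStep b p = b := by
  unfold pvStep
  rw [if_neg]
  rintro ⟨-, h5, h6⟩
  rcases p with _ | ⟨a, _ | ⟨x, t⟩⟩
  · simp at h5
  · simp only [List.mem_singleton] at h5 h6
    rw [← h5] at h6; exact absurd h6 (by decide)
  · simp at hp

-- A's loop returns lucky_series when the index has run off the string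
theorem pureLoopA_exit (s lucky : List Char) (state first index : Nat)
    (h : s.length ≤ index) : pureLoopA s lucky state first index = lucky := by
  rw [pureLoopA]
  simp [Nat.not_lt.mpr h]

-- both claims of the main invariant at loop exit (index past the end of the string)
theorem pureLoopA_eq_exit (s : List Char) (index first : Nat) (lucky : List Char)
    (hge : s.length ≤ index) (hle : index ≤ s.length) :
    (pureLoopA s lucky 0 first index
        = pureBestB (pureRunsB (s.drop index) [] []) lucky)
    ∧ (first < index →
       (∀ c ∈ (s.drop first).take (index - first), c = '5' ∨ c = '6') →
       (index = s.length → index - first = 1) →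
       pureLoopA s lucky 1 first index
        = pureBestB (pureRunsB (s.drop index) ((s.drop first).take (index - first)) []) lucky) := by
  have hidx : index = s.length := by omega
  constructor
  · rw [pureLoopA_exit s lucky 0 first index hge, List.drop_eq_nil_of_le hge]
    simp [pureRunsB, pureBestB]
  · intro hfi hall hlast
    rw [pureLoopA_exit s lucky 1 first index hge, List.drop_eq_nil_of_le hge]
    have h1 : index - first = 1 := hlast hidx
    rw [h1]
    have hlen : ((s.drop first).take 1).length = 1 := by
      rw [List.length_take, List.length_drop]; omega
    obtain ⟨a, ha⟩ := List.length_eq_one_iff.mp hlen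
    rw [ha]
    have hr : pureRunsB ([] : List Char) [a] [] = [[a]] := by simp [pureRunsB]
    rw [hr, pureBestB_singleton]
    exact (pvStep_short lucky [a] (by simp)).symm

-- the main invariant: A's loop from any reachable configuration computes the run fold
theorem pureLoopA_eq (s : List Char) : ∀ (n index first : Nat) (lucky : List Char),
    s.length - index ≤ n → index ≤ s.length →
    (pureLoopA s lucky 0 first index
        = pureBestB (pureRunsB (s.drop index) [] []) lucky)
    ∧ (first < index →
       (∀ c ∈ (s.drop first).take (index - first), c = '5' ∨ c = '6') →
       (index = s.length → index - first = 1) →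
       pureLoopA s lucky 1 first index
        = pureBestB (pureRunsB (s.drop index) ((s.drop first).take (index - first)) []) lucky) := by
  intro n
  induction n with
  | zero =>
    intro index first lucky hn hle
    exact pureLoopA_eq_exit s index first lucky (by omega) hle
  | succ n ih =>
    intro index first lucky hn hle
    by_cases h : index < s.length
    · have hdrop : s.drop index = s[index] :: s.drop (index + 1) := List.drop_eq_getElem_cons h
      constructor
      · -- search_state = 0
        rw [pureLoopA, dif_pos h]
        by_cases hc : s[index] = '5' ∨ s[index] = '6'
        · rw [if_pos ⟨rfl, by simpa using hc⟩]
          have hpend : (s.drop index).take (index + 1 - index) = [s[index]] := by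
            rw [show index + 1 - index = 1 by omega, hdrop]
            rfl
          have hih := (ih (index + 1) index lucky (by omega) (by omega)).2
            (by omega)
            (by rw [hpend]; intro c hcm; rw [List.mem_singleton] at hcm; subst hcm; exact hc)
            (fun _ => by omega)
          rw [hih, hpend, hdrop]
          conv_rhs => rw [pureRunsB]
          rw [if_pos hc, List.nil_append]
        · rw [if_neg (fun hx => hc (by simpa using hx.2)), if_neg (by simp), if_neg (by simp)]
          rw [(ih (index + 1) first lucky (by omega) (by omega)).1, hdrop]
          conv_rhs => rw [pureRunsB]
          rw [if_neg hc, if_pos rfl]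
      · -- search_state = 1
        intro hfi hall hlast
        have hpend1 : (s.drop first).take (index - first) ++ [s[index]]
            = (s.drop first).take (index - first + 1) := by
          have hlt : index - first < (s.drop first).length := by rw [List.length_drop]; omega
          have hfx := List.take_append_getElem hlt
          rw [List.getElem_drop] at hfx
          have hix : first + (index - first) = index := by omega
          simp only [hix] at hfx
          exact hfx
        have hpendlen : ((s.drop first).take (index - first)).length = index - first := by
          rw [List.length_take, List.length_drop]; omega
        rw [pureLoopA, dif_pos h, if_neg (by simp)]
        by_cases hc : s[index] = '5' ∨ s[index] = '6'
        · rw [if_neg (fun hx => hx.2 (by simpa using hc))]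
          by_cases hlx : index = s.length - 1
          · rw [if_pos ⟨rfl, by simpa using hc, hlx⟩]
            dsimp only
            have hnil : s.drop (index + 1) = [] := List.drop_eq_nil_of_le (by omega)
            have hkey : s.drop first = (s.drop first).take (index - first) ++ [s[index]] := by
              have h3 : (s.drop first).take (index - first + 1) = s.drop first := by
                apply List.take_of_length_le
                rw [List.length_drop]; omega
              rw [hpend1, h3]
            have hall' : ∀ c ∈ s.drop first, c = '5' ∨ c = '6' := by
              rw [hkey]; intro c hcm
              rcases List.mem_append.mp hcm with h1 | h1
              · exact hall c h1
              · rw [List.mem_singleton] at h1; subst h1; exact hc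
            rw [PySem.List.slice_from_natCast]
            rw [(ih (index + 1) first _ (by omega) (by omega)).1]
            rw [List.drop_eq_nil_of_le (by omega : s.length ≤ index + 1)]
            rw [hdrop, hnil]
            conv_rhs => rw [pureRunsB]
            rw [if_pos hc]
            conv_rhs => rw [pureRunsB]
            rw [if_neg (show ¬(List.take (index - first) (List.drop first s) ++ [s[index]] = []) by simp)]
            rw [List.nil_append, pureBestB_singleton]
            have hrb : pureRunsB ([] : List Char) [] [] = [] := by simp [pureRunsB]
            rw [hrb]
            simp only [pureBestB, List.foldl_nil]
            rw [← hkey]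
            unfold pvStep
            simp only [pvCond_iff _ hall']
          · rw [if_neg (fun hx => hlx hx.2.2)]
            have hih := (ih (index + 1) first lucky (by omega) (by omega)).2
              (by omega)
              (by
                have hsx : index + 1 - first = index - first + 1 := by omega
                rw [hsx, ← hpend1]
                intro c hcm
                rcases List.mem_append.mp hcm with h1 | h1
                · exact hall c h1
                · rw [List.mem_singleton] at h1; subst h1; exact hc)
              (fun he => absurd (by omega) hlx)
            rw [hih, hdrop]
            conv_rhs => rw [pureRunsB]
            rw [if_pos hc]
            have hsx : index + 1 - first = index - first + 1 := by omega
            rw [hsx, ← hpend1]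
        · rw [if_pos ⟨rfl, fun hm => hc (by simpa using hm)⟩]
          dsimp only
          rw [PySem.List.slice_natCast]
          rw [(ih (index + 1) first _ (by omega) (by omega)).1]
          rw [hdrop]
          conv_rhs => rw [pureRunsB]
          have hpne : (s.drop first).take (index - first) ≠ [] := by
            intro he; rw [he] at hpendlen; simp at hpendlen; omega
          rw [if_neg hc, if_neg hpne, List.nil_append]
          rw [pureRunsB_acc _ [] [(s.drop first).take (index - first)]]
          rw [show pureBestB ([(s.drop first).take (index - first)] ++ pureRunsB (s.drop (index+1)) [] []) lucky
                = pureBestB (pureRunsB (s.drop (index+1)) [] []) (pvStep lucky ((s.drop first).take (index - first)))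
              from by simp [pureBestB, pvStep]]
          have hall' : ∀ c ∈ (s.drop first).take (index - first), c = '5' ∨ c = '6' := hall
          unfold pvStep
          simp only [pvCond_iff _ hall']
    · exact pureLoopA_eq_exit s index first lucky (by omega) hle

-- ===== B side: brute force = run fold =====

-- Python's set(sub) == {'5','6'}
theorem pvSetEq_iff (r : List Char) :
    (PySem.Set.equal (PySem.Set.ofList r) (PySem.Set.ofList ['5', '6']) = true) ↔ pvValid r := by
  rw [PySem.Set.equal_iff]
  constructor
  · intro h
    refine ⟨?_, ?_, ?_⟩
    · have := (h '5').mpr (by rw [PySem.Set.mem_ofList]; simp)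
      rwa [PySem.Set.mem_ofList] at this
    · have := (h '6').mpr (by rw [PySem.Set.mem_ofList]; simp)
      rwa [PySem.Set.mem_ofList] at this
    · intro c hc
      have := (h c).mp (by rw [PySem.Set.mem_ofList]; exact hc)
      rw [PySem.Set.mem_ofList] at this
      simpa using this
  · rintro ⟨h5, h6, hall⟩ x
    rw [PySem.Set.mem_ofList, PySem.Set.mem_ofList]
    constructor
    · intro hx; simpa using hall x hx
    · intro hx
      simp at hx
      rcases hx with rfl | rfl
      · exact h5
      · exact h6

theorem pvStepV_nil (b : List Char) : pvStepV b [] = b := by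
  simp [pvStepV]

theorem pvFoldV_len (l : List (List Char)) : ∀ b, b.length ≤ (l.foldl pvStepV b).length := by
  induction l with
  | nil => intro b; simp
  | cons x t ih =>
      intro b
      refine le_trans ?_ (ih (pvStepV b x))
      unfold pvStepV; split_ifs with h
      · omega
      · exact le_refl _

theorem pvFoldV_cases (l : List (List Char)) : ∀ b,
    l.foldl pvStepV b = b ∨ ∃ x ∈ l, l.foldl pvStepV b = x := by
  induction l with
  | nil => intro b; left; rfl
  | cons x t ih =>
      intro b
      have hx : pvStepV b x = b ∨ pvStepV b x = x := by
        unfold pvStepV; split_ifs <;> simp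
      rcases ih (pvStepV b x) with h | ⟨y, hy, h⟩
      · rcases hx with hx | hx
        · left; rw [List.foldl_cons, hx]; rw [hx] at h; exact h
        · right
          refine ⟨x, by simp, ?_⟩
          rw [List.foldl_cons, hx]; rw [hx] at h; exact h
      · right
        refine ⟨y, by simp [hy], ?_⟩
        rw [List.foldl_cons]; exact h

theorem pvFoldV_no_update (l : List (List Char)) : ∀ b,
    (∀ x ∈ l, pvValid x → x.length ≤ b.length) → l.foldl pvStepV b = b := by
  induction l with
  | nil => intro b _; rfl
  | cons x t ih =>
      intro b hb
      have hx : pvStepV b x = b := by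
        unfold pvStepV
        rw [if_neg]
        rintro ⟨hlen, h5, h6, hall⟩
        have := hb x (by simp) ⟨h5, h6, hall⟩
        omega
      simp only [List.foldl, hx]
      exact ih b (fun y hy => hb y (by simp [hy]))

theorem pvFoldV_chain (l1 l2 : List (List Char)) (v b : List Char)
    (hv : pvValid v)
    (h1 : ∀ x ∈ l1, x.length < v.length)
    (h2 : ∀ x ∈ l2, pvValid x → x.length ≤ v.length) :
    (l1 ++ v :: l2).foldl pvStepV b = pvStepV b v := by
  rw [List.foldl_append]
  obtain ⟨hv5, hv6, hvall⟩ := hv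
  have hlen := pvFoldV_len l1 b
  by_cases hvb : v.length > (l1.foldl pvStepV b).length
  · have hs : pvStepV (l1.foldl pvStepV b) v = v := by
      unfold pvStepV; rw [if_pos ⟨hvb, hv5, hv6, hvall⟩]
    simp only [List.foldl, hs]
    rw [pvFoldV_no_update l2 v h2]
    unfold pvStepV
    rw [if_pos ⟨by omega, hv5, hv6, hvall⟩]
  · have hb1 : l1.foldl pvStepV b = b := by
      rcases pvFoldV_cases l1 b with h | ⟨x, hx, h⟩
      · exact h
      · exfalso; have := h1 x hx; rw [← h] at this; omega
    rw [hb1] at hvb ⊢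
    have hs : pvStepV b v = b := by
      unfold pvStepV; rw [if_neg (fun hx => hvb hx.1)]
    simp only [List.foldl, hs]
    exact pvFoldV_no_update l2 b (fun x hx hxv => le_trans (h2 x hx hxv) (by omega))

theorem pvDropWhile_eq (p : Char → Bool) (l : List Char) :
    l.dropWhile p = l.drop (l.takeWhile p).length := by
  induction l with
  | nil => rfl
  | cons c t ih =>
      by_cases hc : p c
      · simpa [List.dropWhile_cons, hc] using ih
      · simp [hc]

-- the first element remaining after dropWhile fails the predicate
theorem pvDropWhile_head (p : Char → Bool) : ∀ (l : List Char) (h : Char) (dt : List Char),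
    l.dropWhile p = h :: dt → p h = false := by
  intro l
  induction l with
  | nil => intro h dt hx; cases hx
  | cons c t ih =>
      intro h dt hx
      by_cases hc : p c
      · rw [List.dropWhile_cons, if_pos hc] at hx; exact ih h dt hx
      · rw [List.dropWhile_cons, if_neg hc] at hx
        cases hx
        simpa using hc

-- the character just past the maximal 5/6 prefix fails the predicate
theorem pvBoundary (p : Char → Bool) (l : List Char) (h : (l.takeWhile p).length < l.length) :
    p (l[(l.takeWhile p).length]) = false := by
  have hne : l.dropWhile p ≠ [] := by rw [pvDropWhile_eq]; simp; omega
  have hh := List.head_dropWhile_not p hne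
  have he : (l.dropWhile p).head hne = l[(l.takeWhile p).length]'h := by
    rw [List.head_eq_getElem]
    simp [pvDropWhile_eq]
  rw [he] at hh
  exact hh

theorem pvTake_takeWhile (p : Char → Bool) (l : List Char) :
    l.take (l.takeWhile p).length = l.takeWhile p :=
  (List.prefix_iff_eq_take.mp (List.takeWhile_prefix p)).symm

theorem pvTakeWhile_append_all (p : Char → Bool) (a l : List Char) (h : ∀ x ∈ a, p x = true) :
    (a ++ l).takeWhile p = a ++ l.takeWhile p := by
  induction a with
  | nil => simp
  | cons c tt ih =>
      simp [h c (by simp), ih (fun x hx => h x (by simp [hx]))]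

-- a prefix of t longer than its maximal 5/6 prefix is never valid
theorem pvLongPrefix_invalid (t : List Char) (L : Nat)
    (hgt : (t.takeWhile pv56).length < L) (hle : L ≤ t.length) :
    ¬ pvValid (t.take L) := by
  rintro ⟨-, -, hall⟩
  have hmlt : (t.takeWhile pv56).length < t.length := by omega
  have hb := pvBoundary pv56 t hmlt
  have hmem : t[(t.takeWhile pv56).length]'hmlt ∈ t.take L := by
    have hgm : (t.take L)[(t.takeWhile pv56).length]'(by simp; omega)
        = t[(t.takeWhile pv56).length]'hmlt := List.getElem_take
    rw [← hgm]; exact List.getElem_mem _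
  have hor := hall _ hmem
  simp [pv56] at hb
  tauto

-- folding B's step over all nonempty prefixes of t yields the single candidate step
theorem pvPrefsFold (t : List Char) (b : List Char) :
    ((List.range t.length).map (fun m => t.take (m + 1))).foldl pvStepV b
      = pvStepV b (pvCand t) := by
  have hwn : (t.takeWhile pv56).length ≤ t.length := (List.takeWhile_prefix pv56).length_le
  by_cases hboth : '5' ∈ t.takeWhile pv56 ∧ '6' ∈ t.takeWhile pv56
  · have hcand : pvCand t = t.takeWhile pv56 := by rw [pvCand, if_pos hboth]
    have hwne : t.takeWhile pv56 ≠ [] := by rintro hx; rw [hx] at hboth; simp at hboth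
    have hm1 : 1 ≤ (t.takeWhile pv56).length := by
      have := List.length_pos_of_ne_nil hwne; omega
    have hvalid : pvValid (t.takeWhile pv56) := by
      refine ⟨hboth.1, hboth.2, ?_⟩
      intro c hc
      have := List.mem_takeWhile_imp hc
      simpa [pv56] using this
    obtain ⟨m0, hm0⟩ : ∃ m0, (t.takeWhile pv56).length = m0 + 1 :=
      ⟨(t.takeWhile pv56).length - 1, by omega⟩
    have hsplit : List.range t.length
        = (List.range m0 ++ [m0])
          ++ (List.range (t.length - (m0 + 1))).map (fun x => (m0 + 1) + x) := by
      rw [← List.range_succ, ← List.range_add,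
          show (m0 + 1) + (t.length - (m0 + 1)) = t.length from by omega]
    rw [hsplit, hcand]
    simp only [List.map_append, List.map_cons, List.map_map,
      List.append_assoc, List.singleton_append]
    rw [show t.take (m0 + 1) = t.takeWhile pv56 from by rw [← hm0, pvTake_takeWhile]]
    apply pvFoldV_chain
    · exact hvalid
    · intro x hx
      simp only [List.mem_map, List.mem_range] at hx
      obtain ⟨m, hm, rfl⟩ := hx
      rw [List.length_take]
      omega
    · intro x hx hxv
      exfalso
      simp only [List.mem_map, List.mem_range, Function.comp] at hx
      obtain ⟨m, hm, rfl⟩ := hx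
      exact pvLongPrefix_invalid t ((m0 + 1) + m + 1) (by omega) (by omega) hxv
  · have hcand : pvCand t = [] := by rw [pvCand, if_neg hboth]
    rw [hcand, pvStepV_nil]
    apply pvFoldV_no_update
    intro x hx hxv
    exfalso
    simp only [List.mem_map, List.mem_range] at hx
    obtain ⟨m, hm, rfl⟩ := hx
    by_cases hmw : m + 1 ≤ (t.takeWhile pv56).length
    · obtain ⟨h5, h6, -⟩ := hxv
      have htk : (t.takeWhile pv56).take (m + 1) = t.take (m + 1) := by
        conv_lhs => rw [← pvTake_takeWhile pv56 t]
        rw [List.take_take, Nat.min_eq_left hmw]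
      rw [← htk] at h5 h6
      exact hboth ⟨List.take_subset _ _ h5, List.take_subset _ _ h6⟩
    · exact pvLongPrefix_invalid t (m + 1) (by omega) (by omega) hxv

-- the inner j-loop of B, at outer index k, is the prefix fold over s.drop k
theorem pvInner_eq (s : List Char) (k : Nat) (hk : k < s.length) (b : List Char) :
    (PySem.List.pyRange ((k : Int) + 1) ((s.length : Int) + 1) 1).foldl
      (fun best j =>
        let sub := PySem.List.slice s (some (k : Int)) (some j)
        if sub.length > best.length ∧
            PySem.Set.equal (PySem.Set.ofList sub) (PySem.Set.ofList ['5', '6']) = true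
        then sub else best)
      b
      = pvStepV b (pvCand (s.drop k)) := by
  rw [PySem.List.pyRange_one, List.foldl_map]
  have hcnt : (((s.length : Int) + 1) - ((k : Int) + 1)).toNat = s.length - k := by omega
  rw [hcnt]
  have hstep : ∀ (best : List Char) (m : Nat), m ∈ List.range (s.length - k) →
      (let sub := PySem.List.slice s (some (k : Int)) (some (((k : Int) + 1) + (m : Int)))
       if sub.length > best.length ∧
          PySem.Set.equal (PySem.Set.ofList sub) (PySem.Set.ofList ['5', '6']) = true
       then sub else best)
      = pvStepV best ((s.drop k).take (m + 1)) := by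
    intro best m _
    have hj : ((k : Int) + 1) + (m : Int) = (k : Int) + ((m + 1 : Nat) : Int) := by
      push_cast; ring
    simp only [hj, PySem.List.slice_natCast_add]
    rw [pvStepV]
    exact if_congr (and_congr_right fun _ => pvSetEq_iff _) rfl rfl
  rw [PySem.List.foldl_congr_mem _ _ (fun best m => pvStepV best ((s.drop k).take (m + 1))) b
        (fun best m hm => hstep best m hm)]
  have hlen : s.length - k = (s.drop k).length := by simp
  rw [hlen, ← List.foldl_map]
  exact pvPrefsFold (s.drop k) b

-- B's program is the fold of candidates over all start positions
theorem pvBrute_eq_cands (s : List Char) :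
    pureBruteB s
      = ((List.range s.length).map (fun k => pvCand (s.drop k))).foldl pvStepV ['0'] := by
  unfold pureBruteB
  rw [PySem.List.pyRange_zero_nat, List.foldl_map, List.foldl_map]
  apply PySem.List.foldl_congr_mem
  intro b k hk
  exact pvInner_eq s k (List.mem_range.mp hk) b

-- on an all-5/6 run, B's step is the run-fold step
theorem pvStepV_run (b w : List Char) (hall : ∀ c ∈ w, c = '5' ∨ c = '6') :
    pvStepV b (if '5' ∈ w ∧ '6' ∈ w then w else []) = pvStep b w := by
  by_cases hboth : '5' ∈ w ∧ '6' ∈ w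
  · rw [if_pos hboth]
    unfold pvStepV pvStep
    by_cases hl : w.length > b.length
    · rw [if_pos ⟨hl, hboth.1, hboth.2, hall⟩, if_pos ⟨hl, hboth.1, hboth.2⟩]
    · rw [if_neg (fun hx => hl hx.1), if_neg (fun hx => hl hx.1)]
  · rw [if_neg hboth, pvStepV_nil]
    unfold pvStep
    rw [if_neg (fun hx => hboth ⟨hx.2.1, hx.2.2⟩)]

-- consuming an all-5/6 block just extends the current run
theorem pvRuns_consume (w : List Char) : ∀ (r cur : List Char) (accs : List (List Char)),
    (∀ c ∈ w, c = '5' ∨ c = '6') →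
    pureRunsB (w ++ r) cur accs = pureRunsB r (cur ++ w) accs := by
  induction w with
  | nil => intro r cur accs _; simp
  | cons c t ih =>
      intro r cur accs hall
      have hc : c = '5' ∨ c = '6' := hall c (by simp)
      rw [List.cons_append, pureRunsB]
      simp only [if_pos hc]
      rw [ih r (cur ++ [c]) accs (fun x hx => hall x (by simp [hx]))]
      simp

-- peel the leading maximal run off pureRunsB
theorem pvRuns_decomp (s : List Char) (hne : s.takeWhile pv56 ≠ []) :
    pureRunsB s [] [] = s.takeWhile pv56 :: pureRunsB (s.dropWhile pv56) [] [] := by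
  conv_lhs => rw [← List.takeWhile_append_dropWhile (p := pv56) (l := s)]
  rw [pvRuns_consume _ _ _ _ (fun c hc => by simpa [pv56] using List.mem_takeWhile_imp hc)]
  rcases hd : s.dropWhile pv56 with _ | ⟨h, dt⟩
  · simp [pureRunsB, hne]
  · have hh : ¬(h = '5' ∨ h = '6') := by
      have := pvDropWhile_head pv56 s h dt hd
      simpa [pv56] using this
    rw [pureRunsB]
    simp only [List.nil_append, if_neg hh, if_neg hne]
    rw [pureRunsB]
    simp only [if_neg hh]
    rw [pureRunsB_acc dt [] [s.takeWhile pv56]]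
    simp

-- the candidate fold over all start positions is the run fold (core of the equivalence)
theorem pvCands_eq_runs : ∀ (n : Nat) (s : List Char) (b : List Char), s.length ≤ n →
    ((List.range s.length).map (fun k => pvCand (s.drop k))).foldl pvStepV b
      = pureBestB (pureRunsB s [] []) b := by
  intro n
  induction n with
  | zero =>
      intro s b hs
      have : s = [] := List.length_eq_zero_iff.mp (by omega)
      subst this
      simp [pureRunsB, pureBestB]
  | succ n ih =>
      intro s b hs
      rcases hs0 : s with _ | ⟨c, t⟩
      · simp [pureRunsB, pureBestB]
      · rw [← hs0]
        by_cases hc : pv56 c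
        · -- a maximal 5/6 run starts at the head of s
          have hwne : s.takeWhile pv56 ≠ [] := by
            rw [hs0, List.takeWhile_cons, if_pos hc]; simp
          have hwall : ∀ x ∈ s.takeWhile pv56, x = '5' ∨ x = '6' := by
            intro x hx; simpa [pv56] using List.mem_takeWhile_imp hx
          have hm1 : 1 ≤ (s.takeWhile pv56).length := by
            have := List.length_pos_of_ne_nil hwne; omega
          have hsl : s.length = (s.takeWhile pv56).length + (s.dropWhile pv56).length := by
            conv_lhs => rw [← List.takeWhile_append_dropWhile (p := pv56) (l := s)]
            rw [List.length_append]
          have hdle : (s.dropWhile pv56).length ≤ n := by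
            have h1 : (s.dropWhile pv56).length < s.length := by omega
            omega
          have htwd : (s.dropWhile pv56).takeWhile pv56 = [] := by
            rcases hdx : s.dropWhile pv56 with _ | ⟨h, dt⟩
            · rfl
            · rw [List.takeWhile_cons, pvDropWhile_head pv56 s h dt hdx]
              simp
          have hdw : ∀ j : Nat, j ≤ (s.takeWhile pv56).length →
              s.drop j = (s.takeWhile pv56).drop j ++ s.dropWhile pv56 := by
            intro j hj
            conv_lhs => rw [← List.takeWhile_append_dropWhile (p := pv56) (l := s)]
            rw [List.drop_append_of_le_length hj]
          have hcand : ∀ j : Nat, j ≤ (s.takeWhile pv56).length →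
              pvCand (s.drop j) = (if '5' ∈ (s.takeWhile pv56).drop j ∧ '6' ∈ (s.takeWhile pv56).drop j
                then (s.takeWhile pv56).drop j else []) := by
            intro j hj
            rw [pvCand, hdw j hj,
                pvTakeWhile_append_all pv56 _ _
                  (fun x hx => by
                    have := hwall x (List.drop_subset _ _ hx)
                    simp [pv56]; tauto),
                htwd, List.append_nil]
          have hrsplit : List.range s.length
              = (0 :: (List.range ((s.takeWhile pv56).length - 1)).map Nat.succ)
                ++ (List.range ((s.dropWhile pv56).length)).map
                    (fun x => (s.takeWhile pv56).length + x) := by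
            rw [hsl, List.range_add]
            congr 1
            rw [show (s.takeWhile pv56).length = (s.takeWhile pv56).length - 1 + 1 from by omega,
                List.range_succ_eq_map]
            simp
          rw [hrsplit, List.map_append, List.map_cons, List.foldl_append, List.foldl_cons]
          simp only [List.drop_zero, List.map_map]
          have hcand0 : pvCand s
              = (if '5' ∈ s.takeWhile pv56 ∧ '6' ∈ s.takeWhile pv56 then s.takeWhile pv56 else []) := by
            rw [pvCand]
          rw [hcand0, pvStepV_run b _ hwall]
          have hb1len : ('5' ∈ s.takeWhile pv56 ∧ '6' ∈ s.takeWhile pv56) →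
              (s.takeWhile pv56).length ≤ (pvStep b (s.takeWhile pv56)).length := by
            intro hboth
            unfold pvStep
            split_ifs with h
            · omega
            · have hng : ¬ (s.takeWhile pv56).length > b.length :=
                fun hl => h ⟨hl, hboth.1, hboth.2⟩
              omega
          have hmid :
              ((List.range ((s.takeWhile pv56).length - 1)).map
                  ((fun k => pvCand (s.drop k)) ∘ Nat.succ)).foldl
                pvStepV (pvStep b (s.takeWhile pv56))
                = pvStep b (s.takeWhile pv56) := by
            apply pvFoldV_no_update
            intro x hx hxv
            simp only [List.mem_map, List.mem_range, Function.comp] at hx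
            obtain ⟨j, hj, rfl⟩ := hx
            rw [hcand (Nat.succ j) (by omega)] at hxv ⊢
            by_cases hbb : '5' ∈ (s.takeWhile pv56).drop (Nat.succ j)
                ∧ '6' ∈ (s.takeWhile pv56).drop (Nat.succ j)
            · have hboth : '5' ∈ s.takeWhile pv56 ∧ '6' ∈ s.takeWhile pv56 :=
                ⟨List.drop_subset _ _ hbb.1, List.drop_subset _ _ hbb.2⟩
              rw [if_pos hbb]
              rw [List.length_drop]
              have := hb1len hboth
              omega
            · rw [if_neg hbb] at hxv
              exact absurd hxv.1 (by simp)
          rw [hmid]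
          have htail :
              ((List.range ((s.dropWhile pv56).length)).map
                  ((fun k => pvCand (s.drop k)) ∘ fun x => (s.takeWhile pv56).length + x))
                = (List.range ((s.dropWhile pv56).length)).map
                    (fun k => pvCand ((s.dropWhile pv56).drop k)) := by
            apply List.map_congr_left
            intro k _
            simp only [Function.comp]
            congr 1
            rw [pvDropWhile_eq, List.drop_drop,
                show (s.takeWhile pv56).length + k = k + (s.takeWhile pv56).length from
                  Nat.add_comm _ _]
          rw [htail, ih (s.dropWhile pv56) (pvStep b (s.takeWhile pv56)) hdle]
          rw [pvRuns_decomp s hwne]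
          rfl
        · -- the head is not a 5/6: step over it
          have hcand0 : pvCand s = [] := by
            rw [pvCand, if_neg]
            rw [hs0, List.takeWhile_cons, if_neg (by simpa using hc)]
            simp
          have hsl : s.length = t.length + 1 := by rw [hs0]; rfl
          rw [hsl, List.range_succ_eq_map, List.map_cons, List.foldl_cons, List.drop_zero,
              hcand0, pvStepV_nil, List.map_map]
          have htail :
              ((List.range t.length).map ((fun k => pvCand (s.drop k)) ∘ Nat.succ))
                = (List.range t.length).map (fun k => pvCand (t.drop k)) := by
            apply List.map_congr_left
            intro k _
            simp only [Function.comp]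
            rw [hs0, List.drop_succ_cons]
          rw [htail, ih t b (by omega)]
          rw [hs0, pureRunsB]
          rw [if_neg (fun hor => hc (by simp [pv56]; exact hor)), if_pos rfl]

-- B computes the run fold
theorem pvBrute_eq_runs (s : List Char) :
    pureBruteB s = pureBestB (pureRunsB s [] []) ['0'] := by
  rw [pvBrute_eq_cands]
  exact pvCands_eq_runs s.length s ['0'] le_rfl

-- ===== VERDICT (by name: the statement is the Claim_ definition above) =====
theorem pure_loop_search_spec : Claim_equal_pure_loop_search := by
  intro n _
  unfold Spec_pure_loop_search pure_loop_search pure_loop_search_alt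
  have h := (pureLoopA_eq (PySem.Int.toChars n) (PySem.Int.toChars n).length 0 0 ['0']
    (by omega) (by omega)).1
  simp at h
  rw [h, pvBrute_eq_runs]
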